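-- pv_equiv track=rewrite | github.com/sinaziaee/DComG | utils.py | predict_all_features_top_new_edges
-- ===== SOURCE A (Python) =====
-- def predict_all_features_top_new_edges(all_top_pairs):
--     all_new_pairs = []
--     for pairs in all_top_pairs:
--         temp_new_pairs = []
--         temp = pairs
--         temp_edges = temp[0]
--         count = 0
--         for edge in temp_edges:
--             t = 0
--             for i in range(len(temp)):
--                 e_list = temp[i]
--                 if edge in e_list:
--                     t += 1
--             if t == len(temp):
--                 count += 1
--                 temp_new_pairs.append(edge)
--         all_new_pairs.append(temp_new_pairs)
--     return all_new_pairs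
-- ===== SOURCE B (Python) =====
-- def predict_all_features_top_new_edges(all_top_pairs):
--     all_new_pairs = []
--     for temp in all_top_pairs:
--         first = temp[0]
--         inter = set(first)
--         for other in temp[1:]:
--             inter &= set(other)
--         all_new_pairs.append([e for e in first if e in inter])
--     return all_new_pairs
-- ===== Notes on version B (the rewrite author's own statement) =====
-- stated objective: faster
-- what changed: Instead of re-scanning every list of the group for every edge of the first list (count == len test), B builds one intersection set of all the group's lists and keeps the first list's edges with a single membership-filter pass.
import Mathlib
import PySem

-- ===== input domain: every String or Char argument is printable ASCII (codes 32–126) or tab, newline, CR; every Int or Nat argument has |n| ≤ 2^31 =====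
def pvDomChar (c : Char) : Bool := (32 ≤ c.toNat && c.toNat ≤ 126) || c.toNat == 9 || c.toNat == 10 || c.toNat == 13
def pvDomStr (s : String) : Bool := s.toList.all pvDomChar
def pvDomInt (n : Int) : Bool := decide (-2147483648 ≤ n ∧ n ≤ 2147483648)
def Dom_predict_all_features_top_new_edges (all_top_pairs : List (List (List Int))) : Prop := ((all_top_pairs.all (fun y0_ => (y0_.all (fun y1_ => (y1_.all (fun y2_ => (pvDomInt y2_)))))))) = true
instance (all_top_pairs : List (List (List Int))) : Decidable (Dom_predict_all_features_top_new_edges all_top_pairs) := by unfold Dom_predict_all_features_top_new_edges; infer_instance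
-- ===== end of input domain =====

-- B replaces A's per-edge rescan of every list of the group (count == len(temp)) by one
-- intersection set built once per group followed by a single order-preserving filter (faster).


-- ===== PORT A =====
-- literal transliteration of A; temp[0] / temp[i] via pyGetD, total under Pre_ (no empty group)
def predict_all_features_top_new_edges (all_top_pairs : List (List (List Int))) : List (List Int) :=
  all_top_pairs.foldl (fun all_new_pairs pairs =>
    let temp := pairs
    let temp_edges := PySem.List.pyGetD temp 0 []
    let st := temp_edges.foldl (fun (st : Int × List Int) edge =>
      let t := (PySem.List.pyRange 0 (PySem.List.len temp) 1).foldl (fun t i =>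
        let e_list := PySem.List.pyGetD temp i []
        if edge ∈ e_list then t + 1 else t) (0 : Int)
      if t = (temp.length : Int) then (st.1 + 1, st.2 ++ [edge]) else st)
      ((0 : Int), ([] : List Int))
    all_new_pairs ++ [st.2]) []

-- ===== PORT B =====
-- literal transliteration of Source B; Python's set of ints is PySem.Set Int
def predict_all_features_top_new_edges_alt (all_top_pairs : List (List (List Int))) : List (List Int) :=
  all_top_pairs.foldl (fun all_new_pairs temp =>
    let first := PySem.List.pyGetD temp 0 []
    let inter := (temp.drop 1).foldl
      (fun (s : PySem.Set Int) other => PySem.Set.inter s (PySem.Set.ofList other))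
      (PySem.Set.ofList first)
    all_new_pairs ++ [first.filter (fun e => PySem.Set.contains inter e)]) []

-- ===== PRECONDITION & SPEC =====
-- Pre_ excludes inputs containing an empty group: there temp[0] raises IndexError in A (and in B).
def Pre_predict_all_features_top_new_edges (all_top_pairs : List (List (List Int))) : Prop :=
  ∀ g ∈ all_top_pairs, g ≠ []
instance (all_top_pairs : List (List (List Int))) : Decidable (Pre_predict_all_features_top_new_edges all_top_pairs) := by unfold Pre_predict_all_features_top_new_edges; infer_instance

def pvWitness_predict_all_features_top_new_edges : List (List (List Int)) :=
  [[[1, 2, 3], [3, 1]], [[4]]]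

def Spec_predict_all_features_top_new_edges (all_top_pairs : List (List (List Int))) (out : List (List Int)) : Prop := out = predict_all_features_top_new_edges_alt all_top_pairs
instance (all_top_pairs : List (List (List Int))) (out : List (List Int)) : Decidable (Spec_predict_all_features_top_new_edges all_top_pairs out) := by unfold Spec_predict_all_features_top_new_edges; infer_instance

-- ===== CLAIM (what is proved, stated in full; the proofs are below) =====
def Claim_equal_predict_all_features_top_new_edges : Prop := ∀ (all_top_pairs : List (List (List Int))), Dom_predict_all_features_top_new_edges all_top_pairs → Pre_predict_all_features_top_new_edges all_top_pairs → Spec_predict_all_features_top_new_edges all_top_pairs (predict_all_features_top_new_edges all_top_pairs)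

-- ===== LEMMAS AND PROOFS =====

-- A's pair-state fold: the second component collects exactly the filtered edges.
theorem pv_pairFold (p : Int → Prop) [DecidablePred p] (edges : List Int) (c : Int) (acc : List Int) :
    (edges.foldl (fun (st : Int × List Int) e =>
      if p e then (st.1 + 1, st.2 ++ [e]) else st) (c, acc)).2
    = acc ++ edges.filter (fun e => decide (p e)) := by
  induction edges generalizing c acc with
  | nil => simp
  | cons e tl ih =>
    simp only [List.foldl_cons, List.filter_cons]
    by_cases h : p e
    · simp [h, ih]
    · simp [h, ih]

-- membership in B's running intersection
theorem pv_memInterFold (rest : List (List Int)) (s : PySem.Set Int) (e : Int) :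
    (e ∈ rest.foldl (fun (s : PySem.Set Int) other =>
        PySem.Set.inter s (PySem.Set.ofList other)) s) ↔ e ∈ s ∧ ∀ l ∈ rest, e ∈ l := by
  induction rest generalizing s with
  | nil => simp
  | cons l tl ih =>
    rw [List.foldl_cons, ih]
    simp only [PySem.Set.inter, List.mem_filter, PySem.Set.contains, List.contains_iff_mem,
      PySem.Set.mem_ofList, List.mem_cons]
    constructor
    · rintro ⟨⟨hs, hl⟩, htl⟩
      refine ⟨hs, fun x hx => ?_⟩
      rcases hx with rfl | hx
      · exact hl
      · exact htl x hx
    · rintro ⟨hs, h⟩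
      exact ⟨⟨hs, h l (Or.inl rfl)⟩, fun x hx => h x (Or.inr hx)⟩

-- A's condition 't == len(temp)' says: the edge is in every list of the group
theorem pv_count_eq (temp : List (List Int)) (edge : Int) :
    (PySem.List.pyRange 0 (PySem.List.len temp) 1).foldl (fun t i =>
        if edge ∈ PySem.List.pyGetD temp i [] then t + 1 else t) (0 : Int)
      = (temp.length : Int) ↔ ∀ l ∈ temp, edge ∈ l := by
  rw [PySem.List.foldl_pyRange_zero_pyGetD temp []
    (fun t e_list => if edge ∈ e_list then t + 1 else t) 0]
  have hc := PySem.List.foldl_count_if (fun l : List Int => decide (edge ∈ l)) temp 0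
  simp only [decide_eq_true_eq] at hc
  rw [hc]
  constructor
  · intro h
    rw [zero_add] at h
    have hn : temp.countP (fun l => decide (edge ∈ l)) = temp.length := by exact_mod_cast h
    rw [List.countP_eq_length] at hn
    intro l hl
    simpa using hn l hl
  · intro h
    have hn : temp.countP (fun l => decide (edge ∈ l)) = temp.length :=
      List.countP_eq_length.mpr (fun l hl => by simpa using h l hl)
    rw [hn]
    omega

-- per-group equality, for a nonempty group
theorem pv_group_eq (first : List Int) (rest : List (List Int)) :
    (first.foldl (fun (st : Int × List Int) edge =>
        if (PySem.List.pyRange 0 (PySem.List.len (first :: rest)) 1).foldl (fun t i =>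
            if edge ∈ PySem.List.pyGetD (first :: rest) i [] then t + 1 else t) (0 : Int)
          = ((first :: rest).length : Int) then (st.1 + 1, st.2 ++ [edge]) else st)
        ((0 : Int), ([] : List Int))).2
    = first.filter (fun e => PySem.Set.contains
        (rest.foldl (fun (s : PySem.Set Int) other =>
          PySem.Set.inter s (PySem.Set.ofList other)) (PySem.Set.ofList first)) e) := by
  rw [pv_pairFold (fun edge => (PySem.List.pyRange 0 (PySem.List.len (first :: rest)) 1).foldl
      (fun t i => if edge ∈ PySem.List.pyGetD (first :: rest) i [] then t + 1 else t) (0 : Int)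
      = ((first :: rest).length : Int)) first 0 []]
  rw [List.nil_append]
  apply List.filter_congr
  intro e he
  have hiff : ((PySem.List.pyRange 0 (PySem.List.len (first :: rest)) 1).foldl (fun t i =>
        if e ∈ PySem.List.pyGetD (first :: rest) i [] then t + 1 else t) (0 : Int)
      = ((first :: rest).length : Int))
      ↔ e ∈ rest.foldl (fun (s : PySem.Set Int) other =>
          PySem.Set.inter s (PySem.Set.ofList other)) (PySem.Set.ofList first) := by
    rw [pv_count_eq, pv_memInterFold, PySem.Set.mem_ofList]
    constructor
    · intro h
      exact ⟨h first (List.mem_cons_self), fun l hl => h l (List.mem_cons_of_mem _ hl)⟩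
    · rintro ⟨h1, h2⟩ l hl
      rcases List.mem_cons.mp hl with rfl | hl'
      · exact h1
      · exact h2 l hl'
  rw [Bool.eq_iff_iff, decide_eq_true_iff, hiff, PySem.Set.contains]
  exact (List.contains_iff_mem).symm

-- ===== VERDICT (by name: the statement is the Claim_ definition above) =====
theorem predict_all_features_top_new_edges_spec : Claim_equal_predict_all_features_top_new_edges := by
  intro all_top_pairs _hdom hpre
  unfold Spec_predict_all_features_top_new_edges
  simp only [predict_all_features_top_new_edges, predict_all_features_top_new_edges_alt]
  rw [PySem.List.foldl_append_singleton_eq_map, PySem.List.foldl_append_singleton_eq_map]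
  apply congrArg
  apply List.map_congr_left
  intro temp htemp
  obtain ⟨first, rest, rfl⟩ : ∃ f r, temp = f :: r := by
    cases temp with
    | nil => exact absurd rfl (hpre [] htemp)
    | cons f r => exact ⟨f, r, rfl⟩
  have h0 : PySem.List.pyGetD (first :: rest) 0 [] = first := by
    simp [PySem.List.pyGetD, PySem.List.pyGet?, PySem.List.pyIdx?]
  rw [h0, List.drop_one, List.tail_cons]
  exact pv_group_eq first rest
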